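-- pv_equiv track=rewrite | github.com/CuongGustav/TestServerFlaskAppOnRender | t.py | group_boxes_by_line
-- ===== SOURCE A (Python) =====
-- def group_boxes_by_line(boxes, line_threshold=15):
--     lines = []
--     boxes = sorted(boxes, key=lambda box: box[1])  # Sắp xếp các hộp theo trục y
--     current_line = [boxes[0]]
--
--     for box in boxes[1:]:
--         if abs(box[1] - current_line[-1][1]) < line_threshold:
--             current_line.append(box)
--         else:
--             lines.append(current_line)
--             current_line = [box]
--     lines.append(current_line)
--     return lines
-- ===== SOURCE B (Python) =====
-- def group_boxes_by_line(boxes, line_threshold=15):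
--     # Staged passes: sort, collect cut indices where the y-gap reaches the
--     # threshold, then slice the sorted list between consecutive bounds.
--     s = sorted(boxes, key=lambda b: b[1])
--     cuts = [i for i in range(1, len(s)) if s[i][1] - s[i-1][1] >= line_threshold]
--     bounds = [0] + cuts + [len(s)]
--     return [s[a:b] for a, b in zip(bounds, bounds[1:])]
-- ===== Notes on version B (the rewrite author's own statement) =====
-- stated objective: alternative
-- what changed: B replaces A's single forward fold with an accumulator (lines, current_line) by three staged passes: sort, a comprehension collecting the cut indices where the adjacent sorted y-gap reaches the threshold, and slicing the sorted list between consecutive bounds with zip.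
import Mathlib
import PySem

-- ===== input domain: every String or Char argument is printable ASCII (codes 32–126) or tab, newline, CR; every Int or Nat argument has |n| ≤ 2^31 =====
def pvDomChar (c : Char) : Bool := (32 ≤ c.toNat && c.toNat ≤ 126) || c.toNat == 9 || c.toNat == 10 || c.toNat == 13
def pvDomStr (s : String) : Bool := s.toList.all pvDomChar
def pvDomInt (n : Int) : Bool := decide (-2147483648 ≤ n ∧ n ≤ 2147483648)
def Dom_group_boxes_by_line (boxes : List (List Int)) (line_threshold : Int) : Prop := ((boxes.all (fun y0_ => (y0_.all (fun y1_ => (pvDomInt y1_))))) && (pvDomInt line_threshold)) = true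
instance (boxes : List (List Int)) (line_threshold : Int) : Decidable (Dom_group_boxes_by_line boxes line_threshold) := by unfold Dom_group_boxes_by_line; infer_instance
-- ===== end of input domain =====

-- B groups by staged passes — sort, collect cut indices where the adjacent y-gap
-- reaches the threshold, slice between consecutive bounds — instead of A's single
-- forward fold; return values only, A's argument is not mutated (sorted() copies).


-- ===== PORT A =====
-- the sort key box[1]; on Pre_ inputs every box has length ≥ 2 so the default never fires
def pvKey (b : List Int) : Int := PySem.List.pyGetD b 1 0

-- one iteration of A's for-loop over state (lines, current_line)
def pvAStep (t : Int) (st : List (List (List Int)) × List (List Int)) (box : List Int) :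
    List (List (List Int)) × List (List Int) :=
  if |pvKey box - pvKey (PySem.List.pyGetD st.2 (-1) [])| < t then
    (st.1, st.2 ++ [box])
  else
    (st.1 ++ [st.2], [box])

def group_boxes_by_line (boxes : List (List Int)) (line_threshold : Int) : List (List (List Int)) :=
  let s := PySem.List.sorted boxes pvKey
  let st := (PySem.List.slice s (some 1) none).foldl (pvAStep line_threshold)
              ([], [PySem.List.pyGetD s 0 []])
  st.1 ++ [st.2]

-- ===== PORT B =====
def group_boxes_by_line_alt (boxes : List (List Int)) (line_threshold : Int) : List (List (List Int)) :=
  let s := PySem.List.sorted boxes pvKey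
  let cuts := (PySem.List.pyRange 1 (s.length : Int) 1).filter
      (fun i => decide (line_threshold ≤ pvKey (PySem.List.pyGetD s i []) - pvKey (PySem.List.pyGetD s (i - 1) [])))
  let bounds := 0 :: (cuts ++ [(s.length : Int)])
  (bounds.zip (PySem.List.slice bounds (some 1) none)).map
      (fun p => PySem.List.slice s (some p.1) (some p.2))

-- ===== PRECONDITION & SPEC =====
-- A raises IndexError on empty boxes (boxes[0]) and whenever some box has fewer than
-- two coordinates (box[1] in the sort key); Pre_ excludes exactly those inputs.
def Pre_group_boxes_by_line (boxes : List (List Int)) (line_threshold : Int) : Prop :=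
  boxes ≠ [] ∧ ∀ b ∈ boxes, 2 ≤ b.length
instance (boxes : List (List Int)) (line_threshold : Int) : Decidable (Pre_group_boxes_by_line boxes line_threshold) := by unfold Pre_group_boxes_by_line; infer_instance

def pvWitness_group_boxes_by_line : List (List Int) × Int := ([[0, 0], [3, 20], [1, 21]], 15)

def Spec_group_boxes_by_line (boxes : List (List Int)) (line_threshold : Int) (out : List (List (List Int))) : Prop := out = group_boxes_by_line_alt boxes line_threshold
instance (boxes : List (List Int)) (line_threshold : Int) (out : List (List (List Int))) : Decidable (Spec_group_boxes_by_line boxes line_threshold out) := by unfold Spec_group_boxes_by_line; infer_instance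

-- ===== CLAIM (what is proved, stated in full; the proofs are below) =====
def Claim_equal_group_boxes_by_line : Prop := ∀ (boxes : List (List Int)) (line_threshold : Int), Dom_group_boxes_by_line boxes line_threshold → Pre_group_boxes_by_line boxes line_threshold → Spec_group_boxes_by_line boxes line_threshold (group_boxes_by_line boxes line_threshold)

-- ===== LEMMAS AND PROOFS =====

-- Proof-side intermediate: the chain grouping as a right fold (prepend to the first
-- group when the gap to its head is small, else open a new group).
def pvBStep (t : Int) (box : List Int) (lines : List (List (List Int))) : List (List (List Int)) :=
  match lines with
  | [] => [[box]]
  | g :: gs =>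
    if pvKey (PySem.List.pyGetD g 0 []) - pvKey box < t then ([box] ++ g) :: gs
    else [box] :: g :: gs

-- A's forward fold with a nonempty current line agrees with the right fold started
-- at the current line's last element, on a key-sorted run.
theorem pvMain (t : Int) (s : List (List Int)) :
    ∀ (cur : List (List Int)) (lines : List (List (List Int))), cur ≠ [] →
    List.Pairwise (fun a b => pvKey a ≤ pvKey b) (PySem.List.pyGetD cur (-1) [] :: s) →
    ∃ G gs,
      (PySem.List.pyGetD cur (-1) [] :: s).foldr (pvBStep t) []
        = (PySem.List.pyGetD cur (-1) [] :: G) :: gs ∧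
      (s.foldl (pvAStep t) (lines, cur)).1 ++ [(s.foldl (pvAStep t) (lines, cur)).2]
        = lines ++ (cur ++ G) :: gs := by
  induction s with
  | nil =>
    intro cur lines hcur _
    exact ⟨[], [], rfl, by simp⟩
  | cons y ys ih =>
    intro cur lines hcur hch
    rw [List.pairwise_cons] at hch
    obtain ⟨hhd, hch'⟩ := hch
    have hle : pvKey (PySem.List.pyGetD cur (-1) []) ≤ pvKey y := hhd y (by simp)
    simp only [List.foldl]
    by_cases hc : pvKey y - pvKey (PySem.List.pyGetD cur (-1) []) < t
    · have hA : pvAStep t (lines, cur) y = (lines, cur ++ [y]) := by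
        simp only [pvAStep]
        rw [if_pos (by rw [abs_of_nonneg (by omega)]; exact hc)]
      rw [hA]
      have hlast : PySem.List.pyGetD (cur ++ [y]) (-1) ([] : List Int) = y :=
        PySem.List.pyGetD_neg_one_append_singleton cur y []
      obtain ⟨G, gs, hB, hA'⟩ := ih (cur ++ [y]) lines (by simp) (by rw [hlast]; exact hch')
      rw [hlast] at hB
      refine ⟨y :: G, gs, ?_, ?_⟩
      · simp only [List.foldr] at hB ⊢
        rw [hB]
        simp only [pvBStep]
        rw [if_pos (by simpa [PySem.List.pyGetD_zero_cons] using hc)]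
        rfl
      · rw [hA']; simp
    · have hA : pvAStep t (lines, cur) y = (lines ++ [cur], [y]) := by
        simp only [pvAStep]
        rw [if_neg (by rw [abs_of_nonneg (by omega)]; exact hc)]
      rw [hA]
      have hlast : PySem.List.pyGetD ([y] : List (List Int)) (-1) ([] : List Int) = y := rfl
      obtain ⟨G, gs, hB, hA'⟩ := ih [y] (lines ++ [cur]) (by simp) (by rw [hlast]; exact hch')
      rw [hlast] at hB
      refine ⟨[], (y :: G) :: gs, ?_, ?_⟩
      · simp only [List.foldr] at hB ⊢
        rw [hB]
        simp only [pvBStep]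
        rw [if_neg (by simpa [PySem.List.pyGetD_zero_cons] using hc)]
      · rw [hA']; simp

-- B's passes, factored out for the proof
def pvCuts (t : Int) (l : List (List Int)) : List Int :=
  (PySem.List.pyRange 1 (l.length : Int) 1).filter
    (fun i => decide (t ≤ pvKey (PySem.List.pyGetD l i []) - pvKey (PySem.List.pyGetD l (i - 1) [])))

def pvS (t : Int) (l : List (List Int)) : List (List (List Int)) :=
  ((0 :: (pvCuts t l ++ [(l.length : Int)])).zip (pvCuts t l ++ [(l.length : Int)])).map
    (fun p => PySem.List.slice l (some p.1) (some p.2))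

theorem pvAlt_eq_pvS (boxes : List (List Int)) (t : Int) :
    group_boxes_by_line_alt boxes t = pvS t (PySem.List.sorted boxes pvKey) := by
  simp [group_boxes_by_line_alt, pvS, pvCuts, PySem.List.slice_from_one]

theorem pvGetShift (x : List Int) (l : List (List Int)) (i : Int) (d : List Int) (h : 0 ≤ i) :
    PySem.List.pyGetD (x :: l) (i + 1) d = PySem.List.pyGetD l i d := by
  obtain ⟨n, rfl⟩ := Int.eq_ofNat_of_zero_le h
  have : ((n : Int) + 1) = ((n + 1 : Nat) : Int) := by push_cast; ring
  rw [this, PySem.List.pyGetD_natCast, PySem.List.pyGetD_natCast]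
  rfl

theorem pvSliceShift (x : List Int) (l : List (List Int)) (a b : Int) (ha : 0 ≤ a) (hb : 0 ≤ b) :
    PySem.List.slice (x :: l) (some (a + 1)) (some (b + 1)) = PySem.List.slice l (some a) (some b) := by
  rw [PySem.List.slice_toNat (x :: l) (show (0:Int) ≤ a + 1 by omega) (show (0:Int) ≤ b + 1 by omega),
      PySem.List.slice_toNat l ha hb]
  have h1 : (a + 1).toNat = a.toNat + 1 := by omega
  have h2 : (b + 1).toNat = b.toNat + 1 := by omega
  rw [h1, h2]
  simp

theorem pvRangeShift (a b : Int) :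
    PySem.List.pyRange (a + 1) (b + 1) 1 = (PySem.List.pyRange a b 1).map (· + 1) := by
  rw [PySem.List.pyRange_one, PySem.List.pyRange_one]
  have : b + 1 - (a + 1) = b - a := by ring
  rw [this, List.map_map]
  exact List.map_congr_left (fun k _ => by simp; ring)

theorem pvCutsNonneg (t : Int) (l : List (List Int)) : ∀ z ∈ pvCuts t l, 0 ≤ z := by
  intro z hz
  have := List.of_mem_filter hz
  have hm := List.mem_of_mem_filter hz
  have := (PySem.List.mem_pyRange_one).1 hm
  omega

-- cut indices of a cons list: possibly a cut at 1, then the tail's cuts shifted by one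
theorem pvCutsCons (t : Int) (x y : List Int) (ys : List (List Int)) :
    pvCuts t (x :: y :: ys)
      = (if t ≤ pvKey y - pvKey x then [(1 : Int)] else []) ++ (pvCuts t (y :: ys)).map (· + 1) := by
  unfold pvCuts
  have hlen : ((x :: y :: ys).length : Int) = ((y :: ys).length : Int) + 1 := by
    simp
  rw [hlen]
  have h1 : (1 : Int) < ((y :: ys).length : Int) + 1 := by
    have : (1 : Int) ≤ ((y :: ys).length : Int) := by simp
    omega
  rw [PySem.List.pyRange_one_cons h1]
  have h2 : ((1 : Int) + 1) = (2 : Int) := by norm_num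
  have hshift : PySem.List.pyRange 2 (((y :: ys).length : Int) + 1) 1
      = (PySem.List.pyRange 1 ((y :: ys).length : Int) 1).map (· + 1) := by
    have := pvRangeShift 1 ((y :: ys).length : Int)
    simpa using this
  rw [List.filter_cons, h2, hshift, List.filter_map]
  have hpt : ∀ i ∈ PySem.List.pyRange 1 ((y :: ys).length : Int) 1,
      (decide (t ≤ pvKey (PySem.List.pyGetD (x :: y :: ys) (i + 1) [])
        - pvKey (PySem.List.pyGetD (x :: y :: ys) (i + 1 - 1) [])))
      = (decide (t ≤ pvKey (PySem.List.pyGetD (y :: ys) i [])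
        - pvKey (PySem.List.pyGetD (y :: ys) (i - 1) []))) := by
    intro i hi
    have hb := (PySem.List.mem_pyRange_one).1 hi
    have e1 : PySem.List.pyGetD (x :: y :: ys) (i + 1) ([] : List Int)
        = PySem.List.pyGetD (y :: ys) i [] := pvGetShift _ _ _ _ (by omega)
    have e3 : i + 1 - 1 = (i - 1) + 1 := by ring
    have e2 : PySem.List.pyGetD (x :: y :: ys) (i + 1 - 1) ([] : List Int)
        = PySem.List.pyGetD (y :: ys) (i - 1) [] := by
      rw [e3]; exact pvGetShift _ _ _ _ (by omega)
    rw [e1, e2]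
  have hfil : List.filter
      ((fun i => decide (t ≤ pvKey (PySem.List.pyGetD (x :: y :: ys) i [])
        - pvKey (PySem.List.pyGetD (x :: y :: ys) (i - 1) []))) ∘ (· + 1))
      (PySem.List.pyRange 1 ((y :: ys).length : Int) 1)
      = List.filter (fun i => decide (t ≤ pvKey (PySem.List.pyGetD (y :: ys) i [])
        - pvKey (PySem.List.pyGetD (y :: ys) (i - 1) [])))
      (PySem.List.pyRange 1 ((y :: ys).length : Int) 1) :=
    List.filter_congr (fun i hi => hpt i hi)
  rw [hfil]
  have hc1 : PySem.List.pyGetD (x :: y :: ys) (1 : Int) ([] : List Int) = y := by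
    have : ((1 : Nat) : Int) = (1 : Int) := by norm_num
    rw [← this, PySem.List.pyGetD_natCast]; rfl
  have hc0 : PySem.List.pyGetD (x :: y :: ys) ((1 : Int) - 1) ([] : List Int) = x := by
    norm_num [PySem.List.pyGetD_zero_cons]
  rw [hc1, hc0]
  by_cases hc : t ≤ pvKey y - pvKey x
  · rw [if_pos (by simpa using hc), if_pos hc]; rfl
  · rw [if_neg (by simpa using hc), if_neg hc]; rfl

-- head slice of a cons list: x plus the correspondingly shorter slice of the tail
theorem pvSliceHead (x : List Int) (l : List (List Int)) (c : Int) (hc : 0 ≤ c) :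
    PySem.List.slice (x :: l) (some 0) (some (c + 1)) = x :: PySem.List.slice l (some 0) (some c) := by
  rw [PySem.List.slice_toNat (x :: l) (show (0:Int) ≤ 0 by norm_num) (show (0:Int) ≤ c + 1 by omega),
      PySem.List.slice_toNat l (show (0:Int) ≤ 0 by norm_num) hc]
  have h2 : (c + 1).toNat = c.toNat + 1 := by omega
  simp [h2]

-- the right fold always produces a first group headed by the first element
theorem pvFoldrHead (t : Int) (y : List Int) (ys : List (List Int)) :
    ∃ g gs, (y :: ys).foldr (pvBStep t) [] = (y :: g) :: gs := by
  cases h : ys.foldr (pvBStep t) [] with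
  | nil => exact ⟨[], [], by simp [List.foldr, h, pvBStep]⟩
  | cons g gs =>
    by_cases hc : pvKey (PySem.List.pyGetD g 0 []) - pvKey y < t
    · exact ⟨g, gs, by simp [List.foldr, h, pvBStep, hc]⟩
    · exact ⟨[], g :: gs, by simp [List.foldr, h, pvBStep, hc]⟩

-- B's staged slicing equals the right-fold chain grouping, on every nonempty list
theorem pvSF (t : Int) : ∀ (xs : List (List Int)) (x : List Int),
    pvS t (x :: xs) = (x :: xs).foldr (pvBStep t) [] := by
  intro xs
  induction xs with
  | nil =>
    intro x
    unfold pvS pvCuts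
    rw [show (([x] : List (List Int)).length : Int) = 1 by simp]
    rw [PySem.List.pyRange_one_eq_nil (by norm_num)]
    simp [pvBStep, PySem.List.slice_to ([x] : List (List Int)) (show (0:Int) ≤ 1 by norm_num)]
  | cons y ys ih =>
    intro x
    obtain ⟨g, gs, hF⟩ := pvFoldrHead t y ys
    have hIH := (ih y).trans hF
    have hlen : ((x :: y :: ys).length : Int) = ((y :: ys).length : Int) + 1 := by
      simp
    obtain ⟨c0, C1, hC⟩ : ∃ c0 C1, pvCuts t (y :: ys) ++ [((y :: ys).length : Int)] = c0 :: C1 := by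
      cases h : pvCuts t (y :: ys) with
      | nil => exact ⟨((y :: ys).length : Int), [], by simp⟩
      | cons a l => exact ⟨a, l ++ [((y :: ys).length : Int)], by simp⟩
    have hCnn : ∀ z ∈ (c0 :: C1 : List Int), 0 ≤ z := by
      rw [← hC]
      intro z hz
      rcases List.mem_append.1 hz with h | h
      · exact pvCutsNonneg t _ z h
      · simp at h; omega
    -- the tail of pvS (y :: ys): hIH forces the head slice to be y :: g and the rest gs
    have hSy : PySem.List.slice (y :: ys) (some 0) (some c0)
          :: (List.zip (c0 :: C1) C1).map (fun p => PySem.List.slice (y :: ys) (some p.1) (some p.2))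
        = (y :: g) :: gs := by
      rw [← hIH]
      unfold pvS
      rw [hC]
      rfl
    have hhead : PySem.List.slice (y :: ys) (some 0) (some c0) = y :: g :=
      (List.cons.injEq _ _ _ _ ▸ hSy).1
    have htail : (List.zip (c0 :: C1) C1).map
        (fun p => PySem.List.slice (y :: ys) (some p.1) (some p.2)) = gs :=
      (List.cons.injEq _ _ _ _ ▸ hSy).2
    -- the bounds of pvS (x :: y :: ys) are the shifted bounds, possibly with a cut at 1
    have hbounds : pvCuts t (x :: y :: ys) ++ [((x :: y :: ys).length : Int)]
        = (if t ≤ pvKey y - pvKey x then [(1 : Int)] else [])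
          ++ ((c0 :: C1).map (· + 1)) := by
      rw [pvCutsCons, hlen, List.append_assoc, ← hC]
      simp
    have hgKey : pvKey (PySem.List.pyGetD (y :: g) 0 ([] : List Int)) = pvKey y := by
      rw [PySem.List.pyGetD_zero_cons]
    by_cases hc : t ≤ pvKey y - pvKey x
    · -- a cut at index 1: x alone, then the groups of the tail
      rw [if_pos hc] at hbounds
      unfold pvS
      rw [hbounds]
      have hz : List.zip ((0 : Int) :: ([(1 : Int)] ++ (c0 :: C1).map (· + 1)))
            ([(1 : Int)] ++ (c0 :: C1).map (· + 1))
          = ((0 : Int), (1 : Int)) :: (List.zip ((0 : Int) :: c0 :: C1) (c0 :: C1)).map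
              (Prod.map (· + 1) (· + 1)) := by
        have h10 : ([(1 : Int)] ++ (c0 :: C1).map (· + 1))
            = ((0 : Int) :: c0 :: C1).map (· + 1) := by simp
        have hm : ((0 : Int) :: c0 :: C1).map (· + 1)
            = (0 + 1) :: (c0 :: C1).map (· + 1) := by simp
        rw [h10, hm, List.zip_cons_cons, ← hm, List.zip_map]
        norm_num
      rw [hz]
      simp only [List.map_cons, List.map_map]
      have h1 : PySem.List.slice (x :: y :: ys) (some 0) (some 1) = [x] := by
        have h := pvSliceHead x (y :: ys) 0 (le_refl 0)
        norm_num at h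
        exact h
      have h2 : (List.zip ((0 : Int) :: c0 :: C1) (c0 :: C1)).map
            ((fun p : Int × Int => PySem.List.slice (x :: y :: ys) (some p.1) (some p.2))
              ∘ Prod.map (· + 1) (· + 1))
          = (List.zip ((0 : Int) :: c0 :: C1) (c0 :: C1)).map
            (fun p : Int × Int => PySem.List.slice (y :: ys) (some p.1) (some p.2)) := by
        apply List.map_congr_left
        intro p hp
        have hmem := List.of_mem_zip hp
        have h1 : 0 ≤ p.1 := by
          rcases List.mem_cons.1 hmem.1 with h | h
          · omega
          · exact hCnn _ h
        have h2 : 0 ≤ p.2 := hCnn _ hmem.2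
        exact pvSliceShift _ _ _ _ h1 h2
      rw [h1, h2]
      have hrest : (List.zip ((0 : Int) :: c0 :: C1) (c0 :: C1)).map
            (fun p : Int × Int => PySem.List.slice (y :: ys) (some p.1) (some p.2))
          = (y :: g) :: gs := by
        rw [← hSy]
        simp [List.zip_cons_cons]
      rw [hrest]
      simp only [List.foldr_cons, hF, pvBStep, hgKey]
      rw [if_neg (by omega)]
    · -- no cut: x joins the first group of the tail
      rw [if_neg hc] at hbounds
      unfold pvS
      rw [hbounds]
      have hz : List.zip ((0 : Int) :: ([] ++ (c0 :: C1).map (· + 1)))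
            ([] ++ (c0 :: C1).map (· + 1))
          = ((0 : Int), c0 + 1) :: (List.zip (c0 :: C1) C1).map
              (Prod.map (· + 1) (· + 1)) := by
        have hm : (c0 :: C1).map (· + 1) = (c0 + 1) :: C1.map (· + 1) := by simp
        rw [List.nil_append, hm, List.zip_cons_cons, ← hm, List.zip_map]
      rw [hz]
      simp only [List.map_cons, List.map_map]
      have h1 : PySem.List.slice (x :: y :: ys) (some 0) (some (c0 + 1))
          = x :: (y :: g) := by
        rw [pvSliceHead x (y :: ys) c0 (hCnn c0 (by simp)), hhead]
      have h2 : (List.zip (c0 :: C1) C1).map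
            ((fun p : Int × Int => PySem.List.slice (x :: y :: ys) (some p.1) (some p.2))
              ∘ Prod.map (· + 1) (· + 1))
          = (List.zip (c0 :: C1) C1).map
            (fun p : Int × Int => PySem.List.slice (y :: ys) (some p.1) (some p.2)) := by
        apply List.map_congr_left
        intro p hp
        have hmem := List.of_mem_zip hp
        exact pvSliceShift _ _ _ _ (hCnn _ hmem.1) (hCnn _ (List.mem_cons_of_mem _ hmem.2))
      rw [h1, h2, htail]
      simp only [List.foldr_cons, hF, pvBStep, hgKey]
      rw [if_pos (by omega)]
      rfl

-- ===== VERDICT (by name: the statement is the Claim_ definition above) =====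
theorem group_boxes_by_line_spec : Claim_equal_group_boxes_by_line := by
  intro boxes t _ hpre
  obtain ⟨hne, _⟩ := hpre
  unfold Spec_group_boxes_by_line group_boxes_by_line
  have hsne : PySem.List.sorted boxes pvKey ≠ [] := by
    simpa [PySem.List.sorted_eq_nil_iff] using hne
  obtain ⟨x, rest, hs⟩ := List.exists_cons_of_ne_nil hsne
  have hpair : (PySem.List.sorted boxes pvKey).Pairwise (fun a b => pvKey a ≤ pvKey b) :=
    PySem.List.sorted_pairwise boxes pvKey
  rw [pvAlt_eq_pvS, hs] at *
  dsimp only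
  have hslice : PySem.List.slice (x :: rest) (some 1) none = rest := by
    have := PySem.List.slice_from_natCast (x :: rest) 1
    simpa using this
  have hzero : PySem.List.pyGetD (x :: rest) 0 ([] : List Int) = x :=
    PySem.List.pyGetD_zero_cons x rest []
  rw [hslice, hzero]
  have hlast : PySem.List.pyGetD ([x] : List (List Int)) (-1) ([] : List Int) = x := rfl
  obtain ⟨G, gs, hB, hA⟩ := pvMain t rest [x] [] (by simp) (by rw [hlast]; exact hpair)
  rw [hlast] at hB
  rw [hA, pvSF, hB]
  simp
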